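-- pv_equiv track=rewrite | github.com/penguin1109/Algorithm | Daily/9월/week01/05.py | solution
-- ===== SOURCE A (Python) =====
-- def solution(word):
--     alphs = ['A', 'E', 'I', 'O', 'U']
--     answer = 0
--     for i in range(len(word)):
--         w = word[i]
--         if w == 'A':
--             answer += 1
--         else:
--             for j in range(4, i, -1):
--                 answer += alphs.index(w) * (5**(j-i))
--             answer += alphs.index(w)+1
--
--     return answer
-- ===== SOURCE B (Python) =====
-- def solution(word):
--     VOWELS = ('A', 'E', 'I', 'O', 'U')
--     answer = 0
--     for i, w in enumerate(word):
--         d = VOWELS.index(w)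
--         e = 4 - i
--         answer += d + 1 if e < 0 else d * ((5 ** (e + 1) - 1) // 4) + 1
--     return answer
-- ===== Notes on version B (the rewrite author's own statement) =====
-- stated objective: simpler
-- what changed: The inner geometric loop over j (and the redundant 'A' special case) is replaced by the closed form d*((5**(e+1)-1)//4)+1 per position, turning the nested double loop into a single enumerate pass with constant arithmetic per character.
import Mathlib
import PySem

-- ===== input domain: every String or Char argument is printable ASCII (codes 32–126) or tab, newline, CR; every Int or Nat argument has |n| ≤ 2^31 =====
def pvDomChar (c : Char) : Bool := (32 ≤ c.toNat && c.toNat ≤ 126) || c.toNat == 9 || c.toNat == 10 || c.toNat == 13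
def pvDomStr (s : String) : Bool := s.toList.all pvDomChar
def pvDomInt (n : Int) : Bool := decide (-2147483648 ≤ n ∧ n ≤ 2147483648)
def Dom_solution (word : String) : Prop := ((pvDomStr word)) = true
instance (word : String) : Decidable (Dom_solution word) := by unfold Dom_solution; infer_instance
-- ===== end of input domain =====

-- B replaces A's inner geometric loop by its closed form (d*((5^(e+1)-1)//4)+1), one pass, simpler.

-- ===== PORT A =====
def solAlphs : List Char := ['A', 'E', 'I', 'O', 'U']

def solStepA (chars : List Char) (answer : Int) (i : Int) : Int :=
  let w := PySem.List.pyGetD chars i 'A'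
  if w = 'A' then answer + 1
  else
    let inner := (PySem.List.pyRange 4 i (-1)).foldl
      (fun a j => a + (((PySem.List.index? solAlphs w).getD 0 : Nat) : Int) * 5 ^ (j - i).toNat) answer
    inner + (((PySem.List.index? solAlphs w).getD 0 : Nat) : Int) + 1

def solution (word : String) : Int :=
  (PySem.List.pyRange 0 (PySem.Str.len word) 1).foldl (solStepA word.toList) 0

-- ===== PORT B =====
def solVowels : List Char := ['A', 'E', 'I', 'O', 'U']

def solStepB (answer : Int) (p : Int × Char) : Int :=
  let d : Int := ((PySem.List.index? solVowels p.2).getD 0 : Nat)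
  let e : Int := 4 - p.1
  answer + (if e < 0 then d + 1 else d * PySem.Int.floordiv (5 ^ (e + 1).toNat - 1) 4 + 1)

def solution_alt (word : String) : Int :=
  (PySem.List.enumerate word.toList 0).foldl solStepB 0

-- ===== PRECONDITION & SPEC =====
-- Pre_ excludes words containing a non-vowel character: there Python A raises ValueError (list.index), and B raises too.
def Pre_solution (word : String) : Prop := (word.toList.all (fun c => c ∈ (['A', 'E', 'I', 'O', 'U'] : List Char))) = true
instance (word : String) : Decidable (Pre_solution word) := by unfold Pre_solution; infer_instance

def pvWitness_solution : String := "EIO"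

def Spec_solution (word : String) (out : Int) : Prop := out = solution_alt word
instance (word : String) (out : Int) : Decidable (Spec_solution word out) := by unfold Spec_solution; infer_instance

-- ===== CLAIM (what is proved, stated in full; the proofs are below) =====
def Claim_equal_solution : Prop := ∀ (word : String), Dom_solution word → Pre_solution word → Spec_solution word (solution word)

-- ===== LEMMAS AND PROOFS =====

-- inner geometric loop of A equals B's closed form, for every index k and coefficient d
lemma geom_closed (d acc : Int) (k : Nat) :
    (PySem.List.pyRange 4 (k : Int) (-1)).foldl
        (fun a j => a + d * 5 ^ (j - (k : Int)).toNat) acc + d + 1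
      = acc + (if 4 - (k : Int) < 0 then d + 1
               else d * PySem.Int.floordiv (5 ^ ((4 - (k : Int)) + 1).toNat - 1) 4 + 1) := by
  match k with
  | 0 =>
      have h : PySem.List.pyRange 4 (0 : Int) (-1) = [4, 3, 2, 1] := by decide
      simp only [Nat.cast_zero] at *
      rw [h]
      norm_num [List.foldl, show ((5:Int).toNat)=5 from rfl, show ((4:Int).toNat)=4 from rfl, show ((3:Int).toNat)=3 from rfl, show ((2:Int).toNat)=2 from rfl, show ((1:Int).toNat)=1 from rfl]
      ring
  | 1 =>
      have h : PySem.List.pyRange 4 (1 : Int) (-1) = [4, 3, 2] := by decide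
      simp only [Nat.cast_one] at *
      rw [h]
      norm_num [List.foldl, show ((5:Int).toNat)=5 from rfl, show ((4:Int).toNat)=4 from rfl, show ((3:Int).toNat)=3 from rfl, show ((2:Int).toNat)=2 from rfl, show ((1:Int).toNat)=1 from rfl]
      ring
  | 2 =>
      have h : PySem.List.pyRange 4 (2 : Int) (-1) = [4, 3] := by decide
      rw [show ((2 : Nat) : Int) = 2 by norm_num, h]
      norm_num [List.foldl, show ((5:Int).toNat)=5 from rfl, show ((4:Int).toNat)=4 from rfl, show ((3:Int).toNat)=3 from rfl, show ((2:Int).toNat)=2 from rfl, show ((1:Int).toNat)=1 from rfl]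
      ring
  | 3 =>
      have h : PySem.List.pyRange 4 (3 : Int) (-1) = [4] := by decide
      rw [show ((3 : Nat) : Int) = 3 by norm_num, h]
      norm_num [List.foldl, show ((5:Int).toNat)=5 from rfl, show ((4:Int).toNat)=4 from rfl, show ((3:Int).toNat)=3 from rfl, show ((2:Int).toNat)=2 from rfl, show ((1:Int).toNat)=1 from rfl]
      ring
  | (n + 4) =>
      have h : PySem.List.pyRange 4 ((n + 4 : Nat) : Int) (-1) = [] := by
        apply PySem.List.pyRange_neg_one_eq_nil
        push_cast; omega
      rw [h]
      simp only [List.foldl]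
      split_ifs with hlt
      · ring
      · have hn : n = 0 := by push_cast at hlt; omega
        subst hn
        norm_num
        ring

-- one loop iteration of A equals one of B
lemma step_eq (chars : List Char) (k : Nat) (hk : k < chars.length) (acc : Int) :
    solStepA chars acc (k : Int) = solStepB acc ((k : Int), chars[k]) := by
  have hw : PySem.List.pyGetD chars (k : Int) 'A' = chars[k] := by
    rw [PySem.List.pyGetD_natCast]
    exact List.getD_eq_getElem chars 'A' hk
  unfold solStepA solStepB
  rw [hw]
  by_cases hA : chars[k] = 'A'
  · rw [if_pos hA, hA]
    have hd : ((PySem.List.index? solVowels 'A').getD 0 : Nat) = 0 := by decide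
    simp only [hd, Nat.cast_zero]
    split_ifs <;> ring
  · rw [if_neg hA]
    have hv : solVowels = solAlphs := rfl
    rw [hv]
    exact geom_closed _ acc k

-- the whole loops agree, by induction on the remaining suffix
lemma loops_eq (chars : List Char) :
    ∀ (n k : Nat) (acc : Int), k + n = chars.length →
      (PySem.List.pyRange (k : Int) (chars.length : Int) 1).foldl (solStepA chars) acc
        = (PySem.List.enumerate (chars.drop k) (k : Int)).foldl solStepB acc := by
  intro n
  induction n with
  | zero =>
      intro k acc hk
      have hkl : k = chars.length := by omega
      subst hkl
      rw [PySem.List.pyRange_one_eq_nil (le_refl _)]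
      rw [List.drop_of_length_le (le_refl _)]
      simp [PySem.List.enumerate]
  | succ n ih =>
      intro k acc hk
      have hklt : k < chars.length := by omega
      rw [PySem.List.pyRange_one_cons (by exact_mod_cast hklt)]
      rw [List.drop_eq_getElem_cons hklt, PySem.List.enumerate_cons]
      simp only [List.foldl_cons]
      rw [step_eq chars k hklt acc]
      have hcast : (k : Int) + 1 = ((k + 1 : Nat) : Int) := by push_cast; ring
      rw [hcast]
      exact ih (k + 1) _ (by omega)

-- ===== VERDICT (by name: the statement is the Claim_ definition above) =====
theorem solution_spec : Claim_equal_solution := by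
  intro word _ _
  unfold Spec_solution solution solution_alt
  have hlen : PySem.Str.len word = (word.toList.length : Int) := by
    simp [PySem.Str.len_eq]
  rw [hlen]
  have := loops_eq word.toList word.toList.length 0 0 (by omega)
  simpa using this
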